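-- pv_equiv track=rewrite | github.com/davidb2/projecteuler | python/pe145.py | is_reversible
-- ===== SOURCE A (Python) =====
-- def is_reversible(n):
--     # if n in cache: return cache[n]
--     a = str(n)
--     b = str(n)[::-1]
--     if n%10 == 0 or int(a[0])%2 == int(a[-1])%2:
--         # cache[int(b)] = False
--         return False
--     carry = 0
--     for i in range(len(a)):
--         s = int(a[i]) + int(b[i]) + carry
--         if s % 2 == 0:
--             # cache[int(b)] = False
--             return False
--         carry = s//10
--     # cache[int(b)] = True
--     return True
-- ===== SOURCE B (Python) =====
-- def is_reversible(n):
--     if n % 10 == 0: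
--         return False
--     r, m = 0, n
--     while m > 0:
--         r = r * 10 + m % 10
--         m //= 10
--     s = n + r
--     while s > 0:
--         if s % 2 == 0:
--             return False
--         s //= 10
--     return True
-- ===== Notes on version B (the rewrite author's own statement) =====
-- stated objective: simpler
-- what changed: Replaces the str(n)/reversed-string digit-pair carry loop (with its redundant first/last-digit parity guard) by pure integer arithmetic: reverse n numerically, add, and check every digit of the sum odd by repeated division by ten.
import Mathlib
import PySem

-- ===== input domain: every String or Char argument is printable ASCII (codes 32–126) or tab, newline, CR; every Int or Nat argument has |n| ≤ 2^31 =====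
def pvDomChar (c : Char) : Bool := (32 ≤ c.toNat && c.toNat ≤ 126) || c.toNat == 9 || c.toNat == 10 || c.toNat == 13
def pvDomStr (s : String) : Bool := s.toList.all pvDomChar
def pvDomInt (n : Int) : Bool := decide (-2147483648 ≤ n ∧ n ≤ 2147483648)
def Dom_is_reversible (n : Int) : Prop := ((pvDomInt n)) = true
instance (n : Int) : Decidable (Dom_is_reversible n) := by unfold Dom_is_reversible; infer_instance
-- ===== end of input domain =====

-- B replaces A's reversed-string digit-pair carry loop by pure integer arithmetic (numeric reversal,
-- one addition, then a digit-parity loop over the sum); objective: simpler.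

-- ===== PORT A =====
-- int(cs[i]) — the .getD 0 stands for IndexError/ValueError, both excluded by Pre_
def pvChInt (cs : List Char) (i : Int) : Int :=
  ((PySem.List.pyGet? cs i).bind (fun c => PySem.Int.ofChars? [c])).getD 0

-- 'for i in range(len(a)): s = int(a[i]) + int(b[i]) + carry; if s % 2 == 0: return False; carry = s//10'
def pvLoopA (a b : List Char) : List Int → Int → Bool
  | [], _ => true
  | i :: rest, carry =>
    let s := pvChInt a i + pvChInt b i + carry
    if PySem.Int.mod s 2 == 0 then false
    else pvLoopA a b rest (PySem.Int.floordiv s 10)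

def is_reversible (n : Int) : Bool :=
  let a := PySem.Int.toChars n
  let b := (PySem.List.slice? a none none (-1)).getD []
  if (PySem.Int.mod n 10 == 0) ||
     (PySem.Int.mod (pvChInt a 0) 2 == PySem.Int.mod (pvChInt a (-1)) 2) then false
  else pvLoopA a b (PySem.List.pyRange 0 (a.length : Int) 1) 0

-- ===== PORT B =====
-- 'while m > 0: r = r * 10 + m % 10; m //= 10'
def pvRevNum (m r : Int) : Int :=
  if _h : 0 < m then pvRevNum (PySem.Int.floordiv m 10) (r * 10 + PySem.Int.mod m 10) else r
  termination_by m.toNat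
  decreasing_by
    rw [PySem.Int.floordiv_eq_ediv_of_pos (by omega)]
    omega

-- 'while s > 0: if s % 2 == 0: return False; s //= 10'
def pvAllOdd (s : Int) : Bool :=
  if _h : 0 < s then
    if PySem.Int.mod s 2 == 0 then false else pvAllOdd (PySem.Int.floordiv s 10)
  else true
  termination_by s.toNat
  decreasing_by
    rw [PySem.Int.floordiv_eq_ediv_of_pos (by omega)]
    omega

def is_reversible_alt (n : Int) : Bool :=
  if PySem.Int.mod n 10 == 0 then false
  else pvAllOdd (n + pvRevNum n 0)

-- ===== PRECONDITION & SPEC =====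
-- Pre_ excludes exactly the negative inputs with a nonzero last digit: there A raises ValueError (int of a non-digit character).
def Pre_is_reversible (n : Int) : Prop := 0 ≤ n ∨ PySem.Int.mod n 10 = 0
instance (n : Int) : Decidable (Pre_is_reversible n) := by unfold Pre_is_reversible; infer_instance
def pvWitness_is_reversible : Int := (36)

def Spec_is_reversible (n : Int) (out : Bool) : Prop := out = is_reversible_alt n
instance (n : Int) (out : Bool) : Decidable (Spec_is_reversible n out) := by unfold Spec_is_reversible; infer_instance

-- ===== CLAIM (what is proved, stated in full; the proofs are below) =====
def Claim_equal_is_reversible : Prop :=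
  ∀ (n : Int), Dom_is_reversible n → Pre_is_reversible n → Spec_is_reversible n (is_reversible n)

-- ===== LEMMAS AND PROOFS =====

-- grade-school addition of a column-sum list with carry (little-endian)
def pvAddDigits : List Nat → Nat → List Nat
  | [], c => if c = 0 then [] else [c]
  | q :: qs, c => (q + c) % 10 :: pvAddDigits qs ((q + c) / 10)

-- the carry loop's verdict: all column sums (plus carry) odd
def pvAddOdd : List Nat → Nat → Bool
  | [], _ => true
  | q :: qs, c => if (q + c) % 2 = 0 then false else pvAddOdd qs ((q + c) / 10)

theorem pv_getLast?_cons (x : Nat) (l : List Nat) (hl : l ≠ []) :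
    (x :: l).getLast? = l.getLast? := by
  cases l with
  | nil => exact absurd rfl hl
  | cons b m => simp [List.getLast?_cons_cons]

theorem pv_ofDigits_zipWith : ∀ (L1 L2 : List Nat), L1.length = L2.length →
    Nat.ofDigits 10 (List.zipWith (· + ·) L1 L2) = Nat.ofDigits 10 L1 + Nat.ofDigits 10 L2 := by
  intro L1
  induction L1 with
  | nil =>
    intro L2 h
    have : L2 = [] := List.eq_nil_of_length_eq_zero (by simpa using h.symm)
    subst this; simp
  | cons x xs ih =>
    intro L2 h
    cases L2 with
    | nil => simp at h
    | cons y ys =>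
      simp only [List.zipWith_cons_cons, Nat.ofDigits_cons]
      rw [ih ys (by simpa using h)]
      push_cast; ring

theorem pv_ofDigits_addDigits : ∀ (qs : List Nat) (c : Nat),
    Nat.ofDigits 10 (pvAddDigits qs c) = Nat.ofDigits 10 qs + c := by
  intro qs
  induction qs with
  | nil => intro c; by_cases h : c = 0 <;> simp [pvAddDigits, h]
  | cons q qs ih =>
    intro c
    simp only [pvAddDigits, Nat.ofDigits_cons, ih]
    push_cast
    omega

theorem pv_addDigits_lt : ∀ (qs : List Nat) (c : Nat), (∀ q ∈ qs, q ≤ 18) → c ≤ 1 →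
    ∀ y ∈ pvAddDigits qs c, y < 10 := by
  intro qs
  induction qs with
  | nil =>
    intro c _ hc y hy
    unfold pvAddDigits at hy
    by_cases h : c = 0
    · simp [h] at hy
    · simp [h] at hy; omega
  | cons q qs ih =>
    intro c hq hc y hy
    simp only [pvAddDigits, List.mem_cons] at hy
    rcases hy with h | h
    · omega
    · exact ih ((q + c) / 10) (fun x hx => hq x (List.mem_cons_of_mem _ hx))
        (by have := hq q (List.mem_cons_self ..); omega) y h

theorem pv_addDigits_last : ∀ (qs : List Nat) (c : Nat),
    qs.getLast? ≠ some 0 → (pvAddDigits qs c).getLast? ≠ some 0 := by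
  intro qs
  induction qs with
  | nil =>
    intro c _
    unfold pvAddDigits
    by_cases h : c = 0 <;> simp [h]
  | cons q qs ih =>
    intro c h
    have hstep : pvAddDigits (q :: qs) c = (q + c) % 10 :: pvAddDigits qs ((q + c) / 10) := rfl
    rw [hstep]
    by_cases hnil : pvAddDigits qs ((q + c) / 10) = []
    · have hq0 : qs = [] := by
        cases qs with
        | nil => rfl
        | cons a b => exact absurd hnil (by simp [pvAddDigits])
      subst hq0
      have hc10 : (q + c) / 10 = 0 := by
        by_contra hco
        simp [pvAddDigits, hco] at hnil
      have hq : q ≠ 0 := by simpa using h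
      rw [hnil]
      simp
      omega
    · rw [pv_getLast?_cons _ _ hnil]
      apply ih
      cases qs with
      | nil => simp [pvAddDigits] at hnil; simp [pvAddDigits, hnil]
      | cons a b => simpa [List.getLast?_cons_cons] using h

theorem pv_addOdd_eq_all : ∀ (qs : List Nat) (c : Nat), (∀ q ∈ qs, q ≤ 18) → c ≤ 1 →
    pvAddOdd qs c = (pvAddDigits qs c).all (fun d => d % 2 = 1) := by
  intro qs
  induction qs with
  | nil =>
    intro c _ hc
    interval_cases c <;> simp [pvAddOdd, pvAddDigits]
  | cons q qs ih =>
    intro c hq hc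
    simp only [pvAddOdd, pvAddDigits, List.all_cons]
    have hmod : (q + c) % 10 % 2 = (q + c) % 2 := Nat.mod_mod_of_dvd _ (by norm_num)
    by_cases he : (q + c) % 2 = 0
    · simp [he, hmod]
    · simp only [he, if_neg he]
      rw [ih ((q + c) / 10) (fun x hx => hq x (List.mem_cons_of_mem _ hx))
        (by have := hq q (List.mem_cons_self ..); omega)]
      simp [hmod, Nat.mod_two_ne_zero.mp he]

theorem pv_toDigitsCore_eq (fuel : Nat) : ∀ (m : Nat) (ds : List Char), 0 < m → m < 10 ^ fuel →
    Nat.toDigitsCore 10 fuel m ds = ((Nat.digits 10 m).map Nat.digitChar).reverse ++ ds := by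
  induction fuel with
  | zero => intro m ds h1 h2; omega
  | succ fuel ih =>
    intro m ds h1 h2
    rw [Nat.toDigitsCore]
    by_cases h10 : m / 10 = 0
    · have hlt : m < 10 := by omega
      rw [Nat.digits_def' (by norm_num) h1]
      have : Nat.digits 10 (m / 10) = [] := by rw [h10]; simp
      simp [h10, this]
    · rw [if_neg h10]
      rw [ih (m / 10) _ (by omega) (by
        have : m < 10 * 10 ^ fuel := by rw [pow_succ] at h2; omega
        omega)]
      rw [Nat.digits_def' (by norm_num) h1]
      simp

theorem pv_toChars_pos (n : Int) (hn : 0 < n) :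
    PySem.Int.toChars n = ((Nat.digits 10 n.toNat).map Nat.digitChar).reverse := by
  rw [PySem.Int.toChars, if_neg (by omega)]
  rw [Nat.toDigits]
  rw [pv_toDigitsCore_eq (n.toNat + 1) n.toNat [] (by omega)
    (lt_of_lt_of_le (Nat.lt_pow_self (by norm_num)) (Nat.pow_le_pow_right (by norm_num) (by omega)))]
  simp

theorem pv_ofChars_digitChar (d : Nat) (hd : d < 10) :
    PySem.Int.ofChars? [Nat.digitChar d] = some d := by
  interval_cases d <;> decide

theorem pv_chInt_map (L : List Nat) (k : Nat) (hk : k < L.length) (hd : ∀ d ∈ L, d < 10) :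
    pvChInt (L.map Nat.digitChar) (k : Int) = (L[k] : Int) := by
  unfold pvChInt
  rw [PySem.List.pyGet?_natCast]
  rw [List.getElem?_map]
  rw [List.getElem?_eq_getElem hk]
  simp [pv_ofChars_digitChar _ (hd _ (List.getElem_mem hk))]

theorem pv_revNum_eq (m : Nat) : ∀ (r : Int),
    pvRevNum (m : Int) r = r * 10 ^ (Nat.digits 10 m).length + ((Nat.ofDigits 10 (Nat.digits 10 m).reverse : Nat) : Int) := by
  induction m using Nat.strong_induction_on with
  | _ m ih =>
    intro r
    rw [pvRevNum]
    by_cases hm : 0 < m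
    · rw [dif_pos (by exact_mod_cast hm)]
      rw [show PySem.Int.floordiv (m : Int) 10 = ((m / 10 : Nat) : Int) from PySem.Int.floordiv_natCast m 10]
      rw [show PySem.Int.mod (m : Int) 10 = ((m % 10 : Nat) : Int) from PySem.Int.mod_natCast m 10]
      rw [ih (m / 10) (Nat.div_lt_self hm (by norm_num))]
      rw [Nat.digits_def' (b := 10) (by norm_num) hm]
      rw [List.reverse_cons, Nat.ofDigits_append, Nat.ofDigits_singleton]
      simp only [List.length_cons, List.length_reverse]
      push_cast
      ring
    · have : m = 0 := by omega
      subst this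
      rw [dif_neg (by norm_num)]
      simp [Nat.ofDigits_nil]

theorem pv_allOdd_eq (m : Nat) :
    pvAllOdd (m : Int) = (Nat.digits 10 m).all (fun d => d % 2 = 1) := by
  induction m using Nat.strong_induction_on with
  | _ m ih =>
    rw [pvAllOdd]
    by_cases hm : 0 < m
    · rw [dif_pos (by exact_mod_cast hm)]
      rw [show PySem.Int.mod (m : Int) 2 = ((m % 2 : Nat) : Int) from PySem.Int.mod_natCast m 2]
      rw [show PySem.Int.floordiv (m : Int) 10 = ((m / 10 : Nat) : Int) from PySem.Int.floordiv_natCast m 10]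
      rw [Nat.digits_def' (b := 10) (by norm_num) hm]
      rw [List.all_cons]
      have hmod : m % 10 % 2 = m % 2 := Nat.mod_mod_of_dvd _ (by norm_num)
      by_cases he : m % 2 = 0
      · simp [he, hmod]
      · have h1 : m % 2 = 1 := by omega
        rw [ih (m / 10) (Nat.div_lt_self hm (by norm_num))]
        simp [h1, hmod]
    · have : m = 0 := by omega
      subst this
      rw [dif_neg (by norm_num)]
      simp

theorem pv_loopA_eq (L : List Nat) (hd : ∀ d ∈ L, d < 10) :
    ∀ (k j : Nat) (c : Nat), L.length = j + k →
    pvLoopA ((L.map Nat.digitChar).reverse) (L.map Nat.digitChar)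
      (PySem.List.pyRange (j : Int) (L.length : Int) 1) (c : Int)
      = pvAddOdd ((List.zipWith (· + ·) L.reverse L).drop j) c := by
  intro k
  induction k with
  | zero =>
    intro j c hk
    rw [PySem.List.pyRange_one_eq_nil (by omega)]
    rw [List.drop_of_length_le (by simp; omega)]
    rfl
  | succ k ih =>
    intro j c hk
    have hj : j < L.length := by omega
    rw [PySem.List.pyRange_one_cons (by exact_mod_cast hj)]
    have ha : (L.map Nat.digitChar).reverse = L.reverse.map Nat.digitChar := by
      rw [List.map_reverse]
    have h1 : pvChInt ((L.map Nat.digitChar).reverse) (j : Int) = (L.reverse[j]'(by simpa using hj) : Int) := by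
      rw [ha]; exact pv_chInt_map L.reverse j (by simpa using hj) (fun d hdm => hd d (List.mem_reverse.mp hdm))
    have h2 : pvChInt (L.map Nat.digitChar) (j : Int) = (L[j] : Int) := pv_chInt_map L j hj hd
    rw [pvLoopA]
    simp only [h1, h2]
    have hq : (List.zipWith (· + ·) L.reverse L).drop j
        = (L.reverse[j]'(by simpa using hj) + L[j]) :: (List.zipWith (· + ·) L.reverse L).drop (j + 1) := by
      rw [List.drop_eq_getElem_cons (by simp; omega)]
      congr 1
      rw [List.getElem_zipWith]
    rw [hq]
    rw [pvAddOdd]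
    set x : Nat := L.reverse[j]'(by simpa using hj) + L[j] with hx
    have hs : (x : Int) + (c : Int) = ((x + c : Nat) : Int) := by push_cast; ring
    have hcast : ((L.reverse[j]'(by simpa using hj) : Nat) : Int) + ((L[j] : Nat) : Int) + (c : Int)
        = ((x + c : Nat) : Int) := by rw [hx]; push_cast; ring
    rw [hcast]
    rw [show PySem.Int.mod ((x + c : Nat) : Int) 2 = (((x + c) % 2 : Nat) : Int) from PySem.Int.mod_natCast _ 2]
    by_cases he : (x + c) % 2 = 0
    · simp [he]
    · have hbf : (((((x + c) % 2 : Nat)) : Int) == 0) = false := by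
        simp only [beq_eq_false_iff_ne, ne_eq]
        omega
      rw [if_neg (show ¬(((((x + c) % 2 : Nat)) : Int) == 0) = true by simp only [hbf, Bool.false_eq_true, not_false_eq_true]), if_neg he]
      rw [show PySem.Int.floordiv ((x + c : Nat) : Int) 10 = (((x + c) / 10 : Nat) : Int) from PySem.Int.floordiv_natCast _ 10]
      have : ((j : Int) + 1) = ((j + 1 : Nat) : Int) := by push_cast; ring
      rw [this]
      exact ih (j + 1) ((x + c) / 10) (by omega)

theorem pv_chInt_zero (L : List Nat) (hL0 : L ≠ []) (hd : ∀ d ∈ L, d < 10) :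
    pvChInt ((L.map Nat.digitChar).reverse) 0 = (L.getLast hL0 : Int) := by
  have hlen : 0 < L.length := List.length_pos_iff.mpr hL0
  rw [show ((L.map Nat.digitChar).reverse) = L.reverse.map Nat.digitChar from by
    rw [List.map_reverse]]
  have h := pv_chInt_map L.reverse 0 (by simpa using hlen)
    (fun d hdm => hd d (List.mem_reverse.mp hdm))
  simp only [Nat.cast_zero] at h
  rw [h]
  congr 1
  rw [List.getElem_reverse, List.getLast_eq_getElem]
  simp

theorem pv_chInt_neg_one (L : List Nat) (hL0 : L ≠ []) (hd : ∀ d ∈ L, d < 10) :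
    pvChInt ((L.map Nat.digitChar).reverse) (-1)
      = (L[0]'(List.length_pos_iff.mpr hL0) : Int) := by
  have hlen : 0 < L.length := List.length_pos_iff.mpr hL0
  unfold pvChInt
  rw [PySem.List.pyGet?_neg_ofNat _ 1 (by norm_num) (by simpa using hlen)]
  rw [List.getElem?_reverse (by simp; omega)]
  simp only [List.length_reverse, List.length_map, Nat.sub_self]
  rw [List.getElem?_eq_getElem (by simpa using hlen)]
  rw [List.getElem_map]
  simp [pv_ofChars_digitChar _ (hd _ (List.getElem_mem hlen))]

theorem pv_qs_le (L : List Nat) (hd : ∀ d ∈ L, d < 10) :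
    ∀ q ∈ List.zipWith (· + ·) L.reverse L, q ≤ 18 := by
  intro q hq
  obtain ⟨i, hi, rfl⟩ := List.mem_iff_getElem.mp hq
  rw [List.getElem_zipWith]
  have hi1 : i < L.reverse.length := lt_of_lt_of_le hi (by simp)
  have hi2 : i < L.length := lt_of_lt_of_le hi (by simp)
  have h1 : L.reverse[i]'hi1 < 10 := hd _ (List.mem_reverse.mp (List.getElem_mem hi1))
  have h2 : L[i]'hi2 < 10 := hd _ (List.getElem_mem hi2)
  omega

-- B computes "all column sums (with carry) odd" over zipWith (+) L.reverse L
theorem pv_B_eq (n : Int) (hn : 0 < n) (h10 : PySem.Int.mod n 10 ≠ 0) :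
    is_reversible_alt n
      = pvAddOdd (List.zipWith (· + ·) (Nat.digits 10 n.toNat).reverse (Nat.digits 10 n.toNat)) 0 := by
  have hNn : n = ((n.toNat : Nat) : Int) := (Int.toNat_of_nonneg hn.le).symm
  set N := n.toNat with hN
  have hN0 : N ≠ 0 := by omega
  set L := Nat.digits 10 N with hLdef
  have hL0 : L ≠ [] := Nat.digits_ne_nil_iff_ne_zero.mpr hN0
  have hlen : 0 < L.length := List.length_pos_iff.mpr hL0
  have hdlt : ∀ d ∈ L, d < 10 := fun d hd => Nat.digits_lt_base (by norm_num) hd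
  have hmodN : N % 10 ≠ 0 := by
    intro h
    apply h10
    rw [hNn, show PySem.Int.mod ((N : Nat) : Int) 10 = ((N % 10 : Nat) : Int) from
      PySem.Int.mod_natCast N 10, h]
    rfl
  have hLcons : L = N % 10 :: Nat.digits 10 (N / 10) := by
    rw [hLdef]
    exact Nat.digits_def' (b := 10) (by norm_num) (Nat.pos_of_ne_zero hN0)
  have hhead : L[0]'hlen = N % 10 := by simp [hLcons]
  set qs := List.zipWith (· + ·) L.reverse L with hqsdef
  have hqslen : qs.length = L.length := by simp [hqsdef]
  have hqs0 : qs ≠ [] := by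
    intro h
    rw [h] at hqslen
    simp at hqslen
    omega
  have hqs18 : ∀ q ∈ qs, q ≤ 18 := pv_qs_le L hdlt
  have hqlast : qs.getLast? ≠ some 0 := by
    rw [List.getLast?_eq_some_getLast hqs0]
    rw [List.getLast_eq_getElem]
    intro hcon
    have hx : qs[qs.length - 1]'(by omega) = 0 := by simpa using hcon
    rw [List.getElem_zipWith] at hx
    have h1 : L.reverse[qs.length - 1]'(by simp; omega) = L[0]'hlen := by
      rw [List.getElem_reverse, List.getElem_eq_iff]
      rw [show L.length - 1 - (qs.length - 1) = 0 from by omega]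
      exact List.getElem?_eq_getElem hlen
    rw [h1, hhead] at hx
    omega
  -- evaluate B
  rw [is_reversible_alt]
  rw [if_neg (by simp only [beq_iff_eq]; exact h10)]
  -- the sum n + rev(n) as a Nat
  have hrev : pvRevNum n 0 = ((Nat.ofDigits 10 L.reverse : Nat) : Int) := by
    rw [hNn, pv_revNum_eq N 0]
    simp [hLdef]
  have hsum : n + pvRevNum n 0 = ((Nat.ofDigits 10 (pvAddDigits qs 0) : Nat) : Int) := by
    rw [hrev, pv_ofDigits_addDigits qs 0, hqsdef,
      pv_ofDigits_zipWith L.reverse L (by simp)]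
    rw [hLdef, Nat.ofDigits_digits 10 N]
    push_cast
    omega
  rw [hsum, pv_allOdd_eq]
  rw [Nat.digits_ofDigits 10 (by norm_num) _ (pv_addDigits_lt qs 0 hqs18 (by norm_num))
    (by
      intro h
      have hg := pv_addDigits_last qs 0 hqlast
      rw [List.getLast?_eq_some_getLast h] at hg
      intro he
      exact hg (by rw [he]))]
  rw [← pv_addOdd_eq_all qs 0 hqs18 (by norm_num)]

-- the positive-n core
theorem pv_main (n : Int) (hn : 0 < n) (h10 : PySem.Int.mod n 10 ≠ 0) :
    is_reversible n = is_reversible_alt n := by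
  have hNn : n = ((n.toNat : Nat) : Int) := (Int.toNat_of_nonneg hn.le).symm
  set N := n.toNat with hN
  have hN0 : N ≠ 0 := by omega
  set L := Nat.digits 10 N with hLdef
  have hL0 : L ≠ [] := Nat.digits_ne_nil_iff_ne_zero.mpr hN0
  have hlen : 0 < L.length := List.length_pos_iff.mpr hL0
  have hdlt : ∀ d ∈ L, d < 10 := fun d hd => Nat.digits_lt_base (by norm_num) hd
  set qs := List.zipWith (· + ·) L.reverse L with hqsdef
  -- unfold A
  rw [is_reversible]
  rw [pv_toChars_pos n hn]
  rw [show (Nat.digits 10 n.toNat) = L from rfl]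
  rw [PySem.List.slice?_none_none_neg_one, Option.getD_some, List.reverse_reverse]
  rw [pv_chInt_zero L hL0 hdlt, pv_chInt_neg_one L hL0 hdlt]
  rw [show PySem.Int.mod ((L.getLast hL0 : Nat) : Int) 2
      = ((L.getLast hL0 % 2 : Nat) : Int) from PySem.Int.mod_natCast _ 2]
  rw [show PySem.Int.mod ((L[0]'(List.length_pos_iff.mpr hL0) : Nat) : Int) 2
      = ((L[0]'(List.length_pos_iff.mpr hL0) % 2 : Nat) : Int) from PySem.Int.mod_natCast _ 2]
  rw [pv_B_eq n hn h10]
  rw [show (Nat.digits 10 n.toNat) = L from rfl]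
  rw [← hqsdef]
  by_cases hg : L.getLast hL0 % 2 = L[0]'hlen % 2
  · -- A's redundant parity guard fires; the first column sum is even, so B is false too
    rw [if_pos (by simp [hg])]
    have hqlen0 : 0 < qs.length := by simp [hqsdef]; omega
    have hq0 : qs = qs[0]'hqlen0 :: qs.drop 1 := by
      have h1 := List.drop_eq_getElem_cons (l := qs) (i := 0) hqlen0
      rw [List.drop_zero] at h1
      exact h1
    have hq0v : qs[0]'hqlen0 = L.reverse[0]'(by simpa using hlen) + L[0]'hlen := by
      rw [List.getElem_eq_iff, hqsdef, List.getElem?_eq_getElem (by simp; omega),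
        List.getElem_zipWith]
    rw [hq0, hq0v, pvAddOdd]
    rw [if_pos (by
      rw [List.getElem_reverse]
      have hgl : L.getLast hL0 = L[L.length - 1]'(by omega) := List.getLast_eq_getElem hL0
      simp only [Nat.sub_zero]
      omega)]
  · -- guard does not fire: A runs the carry loop, which is exactly pvAddOdd qs 0
    rw [if_neg (by
      simp only [Bool.or_eq_true, beq_iff_eq]
      push_neg
      constructor
      · exact h10
      · intro hcon
        exact hg (by exact_mod_cast hcon))]
    have hlena : ((L.map Nat.digitChar).reverse).length = L.length := by simp
    rw [hlena]
    have h := pv_loopA_eq L hdlt L.length 0 0 (by omega)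
    simp only [Nat.cast_zero, List.drop_zero] at h
    exact h

-- ===== VERDICT (by name: the statement is the Claim_ definition above) =====
theorem is_reversible_spec : Claim_equal_is_reversible := by
  intro n _ hpre
  unfold Spec_is_reversible
  by_cases h10 : PySem.Int.mod n 10 = 0
  · simp only [is_reversible, is_reversible_alt, h10, beq_self_eq_true, Bool.true_or, if_true]
  · have hn : 0 < n := by
      rcases hpre with h | h
      · rcases lt_or_eq_of_le h with h' | h'
        · exact h'
        · exact absurd (by rw [← h']; rfl) h10
      · exact absurd h h10
    exact pv_main n hn h10
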